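-- pv_equiv track=rewrite | github.com/nickcdryan/textevolve | script_flow_graph.py | get_function_category
-- ===== SOURCE A (Python) =====
-- def get_function_category(func_name):
--     """Categorize function based on its name"""
--     if func_name == 'main':
--         return 'main'
--     elif any(term in func_name.lower() for term in ["llm", "call_"]):
--         return 'llm'
--     elif any(term in func_name.lower() for term in ["extract", "parse", "analyze"]):
--         return 'extract'
--     elif any(term in func_name.lower() for term in ["verify", "validate", "check"]):
--         return 'verify'
--     elif any(term in func_name.lower() for term in ["format", "output", "response"]):
--         return 'format'
--     elif any(term in func_name.lower() for term in ["find", "get", "fetch", "search"]):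
--         return 'find'
--     else:
--         return 'other'
-- ===== SOURCE B (Python) =====
-- # Single left-to-right position scan: at every index of the lowercased name,
-- # match all keywords starting there and keep the best (lowest-priority) hit.
-- TERMS = [
--     ("llm", 0, "llm"), ("call_", 0, "llm"),
--     ("extract", 1, "extract"), ("parse", 1, "extract"), ("analyze", 1, "extract"),
--     ("verify", 2, "verify"), ("validate", 2, "verify"), ("check", 2, "verify"),
--     ("format", 3, "format"), ("output", 3, "format"), ("response", 3, "format"),
--     ("find", 4, "find"), ("get", 4, "find"), ("fetch", 4, "find"), ("search", 4, "find"),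
-- ]
--
-- def get_function_category(func_name):
--     """Categorize function based on its name (one positional scan, min-priority accumulator)."""
--     if func_name == 'main':
--         return 'main'
--     lname = func_name.lower()
--     best = None
--     for i in range(len(lname)):
--         for term, pr, cat in TERMS:
--             if lname.startswith(term, i) and (best is None or pr < best[0]):
--                 best = (pr, cat)
--     return best[1] if best is not None else 'other'
-- ===== Notes on version B (the rewrite author's own statement) =====
-- stated objective: alternative
-- what changed: Replaces the priority-ordered substring-test cascade (early return per category) with a single position-driven scan of the lowercased name that matches every keyword starting at each index and keeps the minimum-priority hit in an accumulator, selecting the category only at the end.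
import Mathlib
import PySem

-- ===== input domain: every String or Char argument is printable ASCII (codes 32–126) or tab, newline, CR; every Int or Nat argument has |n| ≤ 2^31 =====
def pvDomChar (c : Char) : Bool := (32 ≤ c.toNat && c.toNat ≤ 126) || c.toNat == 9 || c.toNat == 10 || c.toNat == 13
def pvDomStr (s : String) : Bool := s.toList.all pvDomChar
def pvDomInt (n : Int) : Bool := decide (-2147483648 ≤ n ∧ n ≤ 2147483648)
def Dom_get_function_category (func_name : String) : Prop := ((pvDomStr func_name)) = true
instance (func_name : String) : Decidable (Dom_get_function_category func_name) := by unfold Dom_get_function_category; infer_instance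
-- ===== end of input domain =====

-- B replaces A's priority-ordered substring-test cascade with a single positional scan of the lowercased name that keeps the minimum-priority keyword hit (alternative algorithm, same asymptotic cost).


-- ===== PORT A =====
def get_function_category (func_name : String) : String :=
  if func_name == "main" then "main"
  else if ["llm", "call_"].any (fun term => PySem.Str.isIn term (PySem.Str.lower func_name)) then "llm"
  else if ["extract", "parse", "analyze"].any (fun term => PySem.Str.isIn term (PySem.Str.lower func_name)) then "extract"
  else if ["verify", "validate", "check"].any (fun term => PySem.Str.isIn term (PySem.Str.lower func_name)) then "verify"
  else if ["format", "output", "response"].any (fun term => PySem.Str.isIn term (PySem.Str.lower func_name)) then "format"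
  else if ["find", "get", "fetch", "search"].any (fun term => PySem.Str.isIn term (PySem.Str.lower func_name)) then "find"
  else "other"

-- ===== PORT B =====
-- B's TERMS table: (keyword, priority, category)
def pvTerms : List (String × Int × String) :=
  [("llm", 0, "llm"), ("call_", 0, "llm"),
   ("extract", 1, "extract"), ("parse", 1, "extract"), ("analyze", 1, "extract"),
   ("verify", 2, "verify"), ("validate", 2, "verify"), ("check", 2, "verify"),
   ("format", 3, "format"), ("output", 3, "format"), ("response", 3, "format"),
   ("find", 4, "find"), ("get", 4, "find"), ("fetch", 4, "find"), ("search", 4, "find")]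

def get_function_category_alt (func_name : String) : String :=
  if func_name == "main" then "main"
  else
    let lname := (PySem.Str.lower func_name).toList
    let best := (PySem.List.pyRange 0 (PySem.Chars.len lname) 1).foldl
      (fun best i => pvTerms.foldl
        (fun best tp =>
          -- lname.startswith(term, i): exact here, the loop only produces 0 ≤ i < len(lname)
          if PySem.Chars.startswith (lname.drop i.toNat) tp.1.toList
              && (match best with | none => true | some x => decide (tp.2.1 < x.1))
          then some tp.2 else best)
        best) none
    match best with
    | none => "other"
    | some x => x.2

-- ===== PRECONDITION & SPEC =====
def Spec_get_function_category (func_name : String) (out : String) : Prop := out = get_function_category_alt func_name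
instance (func_name : String) (out : String) : Decidable (Spec_get_function_category func_name out) := by unfold Spec_get_function_category; infer_instance

-- ===== CLAIM (what is proved, stated in full; the proofs are below) =====
def Claim_equal_get_function_category : Prop := ∀ (func_name : String), Dom_get_function_category func_name → Spec_get_function_category func_name (get_function_category func_name)

-- ===== LEMMAS AND PROOFS =====

-- the accumulator step of B on one candidate (match?, priority, category)
def pvStep (b : Option (Int × String)) (c : Bool × Int × String) : Option (Int × String) :=
  if c.1 && (match b with | none => true | some x => decide (c.2.1 < x.1)) then some c.2 else b

def pvCand (s : List Char) : List (Bool × Int × String) :=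
  (PySem.List.pyRange 0 (PySem.Chars.len s) 1).flatMap
    (fun i => pvTerms.map (fun tp => (PySem.Chars.startswith (s.drop i.toNat) tp.1.toList, tp.2)))

lemma pvFold_eq (s : List Char) :
    (PySem.List.pyRange 0 (PySem.Chars.len s) 1).foldl
      (fun best i => pvTerms.foldl
        (fun best tp =>
          if PySem.Chars.startswith (s.drop i.toNat) tp.1.toList
              && (match best with | none => true | some x => decide (tp.2.1 < x.1))
          then some tp.2 else best)
        best) none
    = (pvCand s).foldl pvStep none := by
  unfold pvCand
  generalize PySem.List.pyRange 0 (PySem.Chars.len s) 1 = xs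
  suffices h : ∀ (b : Option (Int × String)),
      xs.foldl (fun best i => pvTerms.foldl
        (fun best tp =>
          if PySem.Chars.startswith (s.drop i.toNat) tp.1.toList
              && (match best with | none => true | some x => decide (tp.2.1 < x.1))
          then some tp.2 else best) best) b
      = (xs.flatMap (fun i => pvTerms.map (fun tp => (PySem.Chars.startswith (s.drop i.toNat) tp.1.toList, tp.2)))).foldl pvStep b from h none
  induction xs with
  | nil => intro b; rfl
  | cons i xs ih =>
    intro b
    simp only [List.foldl_cons, List.flatMap_cons, List.foldl_append, List.foldl_map, ih]
    rfl

lemma pvRun_id (C : List (Bool × Int × String)) (b : Option (Int × String))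
    (h : ∀ c ∈ C, c.1 = false) : C.foldl pvStep b = b := by
  induction C generalizing b with
  | nil => rfl
  | cons c C ih =>
    have hc : c.1 = false := h c (by simp)
    simp only [List.foldl_cons, pvStep, hc, Bool.false_and, if_neg Bool.false_ne_true]
    exact ih b fun c hm => h c (by simp [hm])

lemma pvRun_le (C : List (Bool × Int × String)) :
    ∀ (y x : Int × String), C.foldl pvStep (some y) = some x → x.1 ≤ y.1 := by
  induction C with
  | nil => intro y x h; simp only [List.foldl_nil, Option.some.injEq] at h; exact le_of_eq (congrArg Prod.fst h.symm)
  | cons c C ih =>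
    intro y x h
    simp only [List.foldl_cons, pvStep] at h
    split at h
    · next hcond =>
      have := ih c.2 x h
      simp only [Bool.and_eq_true, decide_eq_true_eq] at hcond
      omega
    · exact ih y x h

lemma pvRun_ne_none (C : List (Bool × Int × String)) :
    ∀ (y : Int × String), C.foldl pvStep (some y) ≠ none := by
  induction C with
  | nil => intro y h; simp at h
  | cons c C ih =>
    intro y h
    simp only [List.foldl_cons, pvStep] at h
    split at h
    · exact ih c.2 h
    · exact ih y h

lemma pvRun_none (C : List (Bool × Int × String)) :
    C.foldl pvStep none = none → ∀ c ∈ C, c.1 = false := by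
  induction C with
  | nil => intro _ c hc; simp at hc
  | cons c C ih =>
    intro h c' hc'
    by_cases hc : c.1 = true
    · exfalso
      simp only [List.foldl_cons, pvStep, hc, Bool.true_and] at h
      exact pvRun_ne_none C c.2 h
    · simp only [Bool.not_eq_true] at hc
      simp only [List.foldl_cons, pvStep, hc, Bool.false_and, if_neg Bool.false_ne_true] at h
      rcases List.mem_cons.mp hc' with rfl | hm
      · exact hc
      · exact ih h c' hm

lemma pvStep_none (c : Bool × Int × String) :
    pvStep none c = if c.1 then some c.2 else none := by
  simp [pvStep]

lemma pvStep_some (y : Int × String) (c : Bool × Int × String) :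
    pvStep (some y) c = if c.1 && decide (c.2.1 < y.1) then some c.2 else some y := by
  simp [pvStep]

lemma pvRun_mem (C : List (Bool × Int × String)) :
    ∀ (b : Option (Int × String)) (x : Int × String), C.foldl pvStep b = some x →
      some x = b ∨ ∃ c ∈ C, c.1 = true ∧ c.2 = x := by
  induction C with
  | nil => intro b x h; exact Or.inl h.symm
  | cons c C ih =>
    intro b x h
    simp only [List.foldl_cons] at h
    by_cases hm : pvStep b c = b
    · rw [hm] at h
      rcases ih b x h with heq | ⟨c', hmem, h1, h2⟩
      · exact Or.inl heq
      · exact Or.inr ⟨c', by simp [hmem], h1, h2⟩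
    · have hstep : pvStep b c = some c.2 ∧ c.1 = true := by
        cases b with
        | none => rw [pvStep_none] at hm ⊢; by_cases hc : c.1 = true <;> simp_all
        | some y => rw [pvStep_some] at hm ⊢; by_cases hc : (c.1 && decide (c.2.1 < y.1)) = true <;> simp_all
      rw [hstep.1] at h
      rcases ih _ x h with heq | ⟨c', hmem, h1, h2⟩
      · exact Or.inr ⟨c, by simp, hstep.2, by injection heq.symm⟩
      · exact Or.inr ⟨c', by simp [hmem], h1, h2⟩

lemma pvRun_min (C : List (Bool × Int × String)) :
    ∀ (b : Option (Int × String)) (x : Int × String), C.foldl pvStep b = some x →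
      ∀ c ∈ C, c.1 = true → x.1 ≤ c.2.1 := by
  induction C with
  | nil => intro b x _ c hc; simp at hc
  | cons c0 C ih =>
    intro b x h c hc hct
    simp only [List.foldl_cons] at h
    rcases List.mem_cons.mp hc with rfl | hm
    · -- head: after its own step the accumulator priority is ≤ c.2.1 and never increases
      cases b with
      | none =>
        rw [pvStep_none, if_pos hct] at h
        exact pvRun_le C _ x h
      | some y =>
        rw [pvStep_some, hct, Bool.true_and] at h
        by_cases hlt : c.2.1 < y.1
        · rw [if_pos (by simpa using hlt)] at h
          exact pvRun_le C _ x h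
        · rw [if_neg (by simpa using hlt)] at h
          have := pvRun_le C y x h
          omega
    · exact ih _ x h c hm hct

lemma pvExists_match_iff (s term : List Char) (hne : term ≠ []) :
    (∃ i ∈ PySem.List.pyRange 0 (PySem.Chars.len s) 1,
        PySem.Chars.startswith (s.drop i.toNat) term = true)
      ↔ PySem.Chars.isIn term s = true := by
  rw [← PySem.Chars.exists_prefix_drop_iff_isIn]
  constructor
  · rintro ⟨i, _, hsw⟩
    exact ⟨i.toNat, (PySem.Chars.startswith_iff _ _).mp hsw⟩
  · rintro ⟨j, hj⟩
    by_cases hlt : j < s.length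
    · refine ⟨(j : Int), ?_, ?_⟩
      · rw [PySem.List.mem_pyRange_one, PySem.Chars.len_eq]
        exact ⟨Int.natCast_nonneg j, by exact_mod_cast hlt⟩
      · rw [PySem.Chars.startswith_iff]
        simpa using hj
    · exfalso
      rw [List.drop_eq_nil_of_le (le_of_not_gt hlt)] at hj
      exact hne (List.prefix_nil.mp hj)

lemma pvTerms_ne_nil : ∀ tp ∈ pvTerms, tp.1.toList ≠ [] := by decide

lemma pvCand_true_imp (s : List Char) :
    ∀ c ∈ pvCand s, c.1 = true →
      ∃ tp ∈ pvTerms, PySem.Chars.isIn tp.1.toList s = true ∧ tp.2 = c.2 := by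
  intro c hc h1
  simp only [pvCand, List.mem_flatMap, List.mem_map] at hc
  obtain ⟨i, hi, tp, htp, rfl⟩ := hc
  exact ⟨tp, htp,
    (pvExists_match_iff s tp.1.toList (pvTerms_ne_nil tp htp)).mp ⟨i, hi, h1⟩, rfl⟩

lemma pvCand_exists (s : List Char) (tp : String × Int × String) (htp : tp ∈ pvTerms)
    (hisin : PySem.Chars.isIn tp.1.toList s = true) :
    ∃ c ∈ pvCand s, c.1 = true ∧ c.2 = tp.2 := by
  obtain ⟨i, hi, hsw⟩ := (pvExists_match_iff s tp.1.toList (pvTerms_ne_nil tp htp)).mpr hisin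
  refine ⟨(PySem.Chars.startswith (s.drop i.toNat) tp.1.toList, tp.2), ?_, hsw, rfl⟩
  simp only [pvCand, List.mem_flatMap, List.mem_map]
  exact ⟨i, hi, tp, htp, rfl⟩

lemma pvBest_none (s : List Char)
    (hall : ∀ tp ∈ pvTerms, PySem.Chars.isIn tp.1.toList s = false) :
    (pvCand s).foldl pvStep none = none := by
  apply pvRun_id
  intro c hc
  by_contra h
  rw [Bool.not_eq_false] at h
  obtain ⟨tp, htp, hin, _⟩ := pvCand_true_imp s c hc h
  rw [hall tp htp] at hin
  exact Bool.false_ne_true hin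

lemma pvBest_some (s : List Char) (k : Int) (cat : String)
    (hwit : ∃ tp ∈ pvTerms, tp.2 = (k, cat) ∧ PySem.Chars.isIn tp.1.toList s = true)
    (hchar : ∀ tp ∈ pvTerms, PySem.Chars.isIn tp.1.toList s = true →
      k ≤ tp.2.1 ∧ (tp.2.1 ≤ k → tp.2 = (k, cat))) :
    (pvCand s).foldl pvStep none = some (k, cat) := by
  obtain ⟨tpw, htpw, htp2, hisin⟩ := hwit
  obtain ⟨cw, hcwmem, hcw1, hcw2⟩ := pvCand_exists s tpw htpw hisin
  cases hres : (pvCand s).foldl pvStep none with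
  | none =>
    exact absurd (pvRun_none _ hres cw hcwmem) (by simp [hcw1])
  | some x =>
    rcases pvRun_mem _ none x hres with h | ⟨c, hcm, hc1, hc2⟩
    · exact absurd h (by simp)
    obtain ⟨tp, htp, htpin, htpeq⟩ := pvCand_true_imp s c hcm hc1
    have hmin := pvRun_min _ none x hres cw hcwmem hcw1
    rw [hcw2, htp2] at hmin
    have hx : tp.2 = x := htpeq.trans hc2
    have hk := hchar tp htp htpin
    have h1 : k ≤ x.1 := by rw [← hx]; exact hk.1
    have h2 := hk.2 (by rw [hx]; omega)
    rw [hx] at h2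
    rw [h2]

def pvSelect (s : List Char) : Option (Int × String) :=
  if PySem.Chars.isIn "llm".toList s || PySem.Chars.isIn "call_".toList s then some (0, "llm")
  else if PySem.Chars.isIn "extract".toList s || (PySem.Chars.isIn "parse".toList s || PySem.Chars.isIn "analyze".toList s) then some (1, "extract")
  else if PySem.Chars.isIn "verify".toList s || (PySem.Chars.isIn "validate".toList s || PySem.Chars.isIn "check".toList s) then some (2, "verify")
  else if PySem.Chars.isIn "format".toList s || (PySem.Chars.isIn "output".toList s || PySem.Chars.isIn "response".toList s) then some (3, "format")
  else if PySem.Chars.isIn "find".toList s || (PySem.Chars.isIn "get".toList s || (PySem.Chars.isIn "fetch".toList s || PySem.Chars.isIn "search".toList s)) then some (4, "find")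
  else none


lemma pvOrSplit3 {a b c : Bool} (h : (a || (b || c)) = true) : a = true ∨ b = true ∨ c = true := by
  simpa [Bool.or_eq_true_iff, or_assoc] using h

lemma pvOrSplit4 {a b c d : Bool} (h : (a || (b || (c || d))) = true) :
    a = true ∨ b = true ∨ c = true ∨ d = true := by
  simpa [Bool.or_eq_true_iff, or_assoc] using h

lemma pvBest_eq (s : List Char) : (pvCand s).foldl pvStep none = pvSelect s := by
  unfold pvSelect
  split_ifs with h0 h1 h2 h3 h4
  · rcases Bool.or_eq_true_iff.mp h0 with h | h
    · exact pvBest_some s 0 "llm" ⟨("llm", 0, "llm"), by simp [pvTerms], rfl, h⟩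
        (by intro tp htp hin; fin_cases htp <;> simp_all)
    · exact pvBest_some s 0 "llm" ⟨("call_", 0, "llm"), by simp [pvTerms], rfl, h⟩
        (by intro tp htp hin; fin_cases htp <;> simp_all)
  · rcases pvOrSplit3 h1 with h | h | h
    · exact pvBest_some s 1 "extract" ⟨("extract", 1, "extract"), by simp [pvTerms], rfl, h⟩
        (by intro tp htp hin; fin_cases htp <;> simp_all)
    · exact pvBest_some s 1 "extract" ⟨("parse", 1, "extract"), by simp [pvTerms], rfl, h⟩
        (by intro tp htp hin; fin_cases htp <;> simp_all)
    · exact pvBest_some s 1 "extract" ⟨("analyze", 1, "extract"), by simp [pvTerms], rfl, h⟩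
        (by intro tp htp hin; fin_cases htp <;> simp_all)
  · rcases pvOrSplit3 h2 with h | h | h
    · exact pvBest_some s 2 "verify" ⟨("verify", 2, "verify"), by simp [pvTerms], rfl, h⟩
        (by intro tp htp hin; fin_cases htp <;> simp_all)
    · exact pvBest_some s 2 "verify" ⟨("validate", 2, "verify"), by simp [pvTerms], rfl, h⟩
        (by intro tp htp hin; fin_cases htp <;> simp_all)
    · exact pvBest_some s 2 "verify" ⟨("check", 2, "verify"), by simp [pvTerms], rfl, h⟩
        (by intro tp htp hin; fin_cases htp <;> simp_all)
  · rcases pvOrSplit3 h3 with h | h | h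
    · exact pvBest_some s 3 "format" ⟨("format", 3, "format"), by simp [pvTerms], rfl, h⟩
        (by intro tp htp hin; fin_cases htp <;> simp_all)
    · exact pvBest_some s 3 "format" ⟨("output", 3, "format"), by simp [pvTerms], rfl, h⟩
        (by intro tp htp hin; fin_cases htp <;> simp_all)
    · exact pvBest_some s 3 "format" ⟨("response", 3, "format"), by simp [pvTerms], rfl, h⟩
        (by intro tp htp hin; fin_cases htp <;> simp_all)
  · rcases pvOrSplit4 h4 with h | h | h | h
    · exact pvBest_some s 4 "find" ⟨("find", 4, "find"), by simp [pvTerms], rfl, h⟩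
        (by intro tp htp hin; fin_cases htp <;> simp_all)
    · exact pvBest_some s 4 "find" ⟨("get", 4, "find"), by simp [pvTerms], rfl, h⟩
        (by intro tp htp hin; fin_cases htp <;> simp_all)
    · exact pvBest_some s 4 "find" ⟨("fetch", 4, "find"), by simp [pvTerms], rfl, h⟩
        (by intro tp htp hin; fin_cases htp <;> simp_all)
    · exact pvBest_some s 4 "find" ⟨("search", 4, "find"), by simp [pvTerms], rfl, h⟩
        (by intro tp htp hin; fin_cases htp <;> simp_all)
  · apply pvBest_none
    intro tp htp
    fin_cases htp <;> simp_all

-- ===== VERDICT (by name: the statement is the Claim_ definition above) =====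
theorem get_function_category_spec : Claim_equal_get_function_category := by
  intro func_name _
  unfold Spec_get_function_category
  unfold get_function_category get_function_category_alt
  by_cases hmain : (func_name == "main") = true
  · simp [hmain]
  · rw [if_neg hmain, if_neg hmain]
    simp only []
    rw [pvFold_eq ((PySem.Str.lower func_name).toList), pvBest_eq]
    unfold pvSelect
    simp only [List.any_cons, List.any_nil, Bool.or_false, PySem.Str.isIn_eq]
    split_ifs <;> rfl
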